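-- pv_equiv track=rewrite | github.com/jbn/pathsjson | pathsjson/helpers.py | to_dependencies_of
-- ===== SOURCE A (Python) =====
-- def to_dependencies_of(g):
--     """
--     Compute the dependencies of each path var.
--
--     :param d: an adjacency list of dependency => [depends on, ...]
--     :return: an adjacency list of the given data structure such that
--         the k => [depends on, ...]. The vertices in the values are
--         presorted to ensure reproducible results
--     """
--     deps = {}
--
--     for k, vertices in g.items():
--         for v in vertices:
--             if v not in deps:
--                 deps[v] = set()
--             deps[v].add(k)
--
--     # I do this for deterministic ordering.
--     return {k: sorted(v) for k, v in deps.items()}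
-- ===== SOURCE B (Python) =====
-- def to_dependencies_of(g):
--     # Pass 1: collect the target vertices in first-appearance order.
--     order = []
--     seen = set()
--     for vertices in g.values():
--         for v in vertices:
--             if v not in seen:
--                 seen.add(v)
--                 order.append(v)
--     # Pass 2: for each target, scan g for the entries that list it.
--     return {t: sorted({k for k, vertices in g.items() if t in vertices})
--             for t in order}
-- ===== Notes on version B (the rewrite author's own statement) =====
-- stated objective: alternative
-- what changed: Replaces the single-pass dict-of-sets grouping with two passes: first collect the target vertices in first-appearance order, then build each dependents list by a set comprehension scanning g for entries that mention the target.
import Mathlib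
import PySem

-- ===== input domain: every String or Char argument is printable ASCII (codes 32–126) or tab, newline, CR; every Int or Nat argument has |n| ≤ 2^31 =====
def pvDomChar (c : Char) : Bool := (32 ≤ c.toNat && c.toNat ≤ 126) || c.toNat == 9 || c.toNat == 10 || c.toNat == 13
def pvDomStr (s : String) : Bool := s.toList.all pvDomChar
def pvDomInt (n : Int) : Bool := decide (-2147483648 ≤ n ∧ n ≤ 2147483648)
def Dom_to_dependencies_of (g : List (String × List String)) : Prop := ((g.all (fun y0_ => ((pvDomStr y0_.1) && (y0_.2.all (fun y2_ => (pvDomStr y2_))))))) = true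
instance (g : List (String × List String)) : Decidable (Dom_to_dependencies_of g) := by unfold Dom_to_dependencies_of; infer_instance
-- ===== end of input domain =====

-- B inverts the adjacency list in two passes (collect targets in first-appearance order, then a
-- scan of g per target) instead of A's single-pass dict-of-sets grouping; objective: alternative.

-- ===== PORT A =====
-- body of A's inner loop: 'if v not in deps: deps[v] = set()' then 'deps[v].add(k)'
def pvAStep (k : String) (deps : PySem.Dict String (PySem.Set String)) (v : String) :
    PySem.Dict String (PySem.Set String) :=
  let deps := if deps.contains v then deps else deps.insert v (PySem.Set.ofList [])
  deps.modify v (PySem.Set.ofList []) (fun s => s.add k)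

def to_dependencies_of (g : List (String × List String)) : List (String × List String) :=
  let deps : PySem.Dict String (PySem.Set String) :=
    g.foldl (fun deps kv => kv.2.foldl (pvAStep kv.1) deps) PySem.Dict.empty
  deps.items.map (fun kv => (kv.1, PySem.List.sorted kv.2 id))

-- ===== PORT B =====
-- body of B's first pass: 'if v not in seen: seen.add(v); order.append(v)'
def pvBStep (st : List String × PySem.Set String) (v : String) : List String × PySem.Set String :=
  if st.2.contains v then st else (st.1 ++ [v], PySem.Set.add st.2 v)

def to_dependencies_of_alt (g : List (String × List String)) : List (String × List String) :=
  let os := g.foldl (fun st kv => kv.2.foldl pvBStep st) ([], PySem.Set.ofList [])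
  os.1.map (fun t =>
    (t, PySem.List.sorted (PySem.Set.ofList ((g.filter (fun kv => kv.2.contains t)).map Prod.fst)) id))

-- ===== PRECONDITION & SPEC =====
def Spec_to_dependencies_of (g : List (String × List String)) (out : List (String × List String)) : Prop := out = to_dependencies_of_alt g
instance (g : List (String × List String)) (out : List (String × List String)) : Decidable (Spec_to_dependencies_of g out) := by unfold Spec_to_dependencies_of; infer_instance

-- ===== CLAIM (what is proved, stated in full; the proofs are below) =====
def Claim_equal_to_dependencies_of : Prop := ∀ (g : List (String × List String)), Dom_to_dependencies_of g → Spec_to_dependencies_of g (to_dependencies_of g)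

-- ===== LEMMAS AND PROOFS =====

-- B's seen set and order list stay equal throughout its first pass
lemma pvBStep_diag (ord : List String) (v : String) :
    pvBStep (ord, ord) v = (PySem.Set.add ord v, PySem.Set.add ord v) := by
  simp [pvBStep, PySem.Set.add_eq_ite, PySem.Set.contains_eq_listContains]
  split <;> rfl

lemma foldB_diag (vs : List String) (ord : List String) :
    vs.foldl pvBStep (ord, ord) = (vs.foldl PySem.Set.add ord, vs.foldl PySem.Set.add ord) := by
  induction vs generalizing ord with
  | nil => rfl
  | cons v rest ih => simp [List.foldl_cons, pvBStep_diag, ih]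

lemma foldB_outer_diag (g : List (String × List String)) (ord : List String) :
    g.foldl (fun st kv => kv.2.foldl pvBStep st) (ord, ord)
      = (g.foldl (fun o kv => kv.2.foldl PySem.Set.add o) ord,
         g.foldl (fun o kv => kv.2.foldl PySem.Set.add o) ord) := by
  induction g generalizing ord with
  | nil => rfl
  | cons kv rest ih => simp [List.foldl_cons, foldB_diag, ih]

-- A's step extends the key list exactly like Set.add extends B's order list
lemma keys_pvAStep (k : String) (deps : PySem.Dict String (PySem.Set String)) (v : String) :
    (pvAStep k deps v).keys = PySem.Set.add deps.keys v := by
  unfold pvAStep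
  by_cases h : deps.contains v = true
  · have hm : v ∈ deps.keys := (PySem.Dict.contains_iff_mem_keys deps v).mp h
    simp only [h, if_pos]
    rw [PySem.Dict.keys_modify, PySem.Dict.keys_insert_of_contains _ _ h,
        PySem.Set.add_eq_ite, if_pos hm]
  · have h' : deps.contains v = false := by simpa using h
    have hm : v ∉ deps.keys := fun hv => h ((PySem.Dict.contains_iff_mem_keys deps v).mpr hv)
    simp only [h', Bool.false_eq_true, if_neg, not_false_iff]
    rw [PySem.Dict.keys_modify, PySem.Dict.keys_insert_of_contains,
        PySem.Dict.keys_insert_of_not_contains _ _ h',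
        PySem.Set.add_eq_ite, if_neg hm]
    · simp

lemma keys_foldA_inner (vs : List String) (k : String) (deps : PySem.Dict String (PySem.Set String)) :
    (vs.foldl (pvAStep k) deps).keys = vs.foldl PySem.Set.add deps.keys := by
  induction vs generalizing deps with
  | nil => rfl
  | cons v rest ih => simp [List.foldl_cons, ih, keys_pvAStep]

-- A's step at value level: the set at t gains k exactly when t = v
lemma getD_pvAStep (k : String) (deps : PySem.Dict String (PySem.Set String)) (v t : String) :
    (pvAStep k deps v).getD t (PySem.Set.ofList []) =
      if t = v then (deps.getD t (PySem.Set.ofList [])).add k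
      else deps.getD t (PySem.Set.ofList []) := by
  unfold pvAStep
  by_cases ht : t = v
  · subst ht
    by_cases h : deps.contains t = true
    · simp only [h, if_pos]
      rw [PySem.Dict.getD_modify_self]
    · have h' : deps.contains t = false := by simpa using h
      simp only [h', Bool.false_eq_true, if_neg, not_false_iff]
      rw [PySem.Dict.getD_modify_self, PySem.Dict.getD_insert_self,
          PySem.Dict.getD_of_not_contains _ _ h']
      simp
  · simp only [if_neg ht]
    by_cases h : deps.contains v = true
    · simp only [h, if_pos]
      rw [PySem.Dict.getD_modify_of_ne _ _ _ ht]
    · have h' : deps.contains v = false := by simpa using h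
      simp only [h', Bool.false_eq_true, if_neg, not_false_iff]
      rw [PySem.Dict.getD_modify_of_ne _ _ _ ht, PySem.Dict.getD_insert_of_ne _ _ _ ht]

lemma add_add_self (s : PySem.Set String) (k : String) : (s.add k).add k = s.add k := by
  apply PySem.Set.add_of_mem
  simp [PySem.Set.mem_add]

lemma getD_foldA_inner (vs : List String) (k : String) (deps : PySem.Dict String (PySem.Set String)) (t : String) :
    (vs.foldl (pvAStep k) deps).getD t (PySem.Set.ofList []) =
      if vs.contains t then (deps.getD t (PySem.Set.ofList [])).add k
      else deps.getD t (PySem.Set.ofList []) := by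
  induction vs generalizing deps with
  | nil => simp
  | cons v rest ih =>
    rw [List.foldl_cons, ih, getD_pvAStep]
    by_cases ht : t = v
    · subst ht
      simp only [List.contains_cons, BEq.rfl, Bool.true_or, if_pos]
      split
      · rw [add_add_self]
      · rfl
    · have : (v :: rest).contains t = rest.contains t := by
        simp [ht]
      rw [this, if_neg ht]

lemma keys_foldA (g : List (String × List String)) (deps : PySem.Dict String (PySem.Set String)) :
    (g.foldl (fun deps kv => kv.2.foldl (pvAStep kv.1) deps) deps).keys
      = g.foldl (fun o kv => kv.2.foldl PySem.Set.add o) deps.keys := by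
  induction g generalizing deps with
  | nil => rfl
  | cons kv rest ih => simp [List.foldl_cons, ih, keys_foldA_inner]

-- A's accumulated set at t = fold of Set.add over the keys of the entries that mention t
lemma getD_foldA (g : List (String × List String)) (deps : PySem.Dict String (PySem.Set String)) (t : String) :
    (g.foldl (fun deps kv => kv.2.foldl (pvAStep kv.1) deps) deps).getD t (PySem.Set.ofList [])
      = List.foldl PySem.Set.add (deps.getD t (PySem.Set.ofList []))
          ((g.filter (fun kv => kv.2.contains t)).map Prod.fst) := by
  induction g generalizing deps with
  | nil => rfl
  | cons kv rest ih =>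
    rw [List.foldl_cons, ih, getD_foldA_inner]
    by_cases h : kv.2.contains t = true
    · have hm : t ∈ kv.2 := by simpa using h
      simp [hm]
    · have h' : kv.2.contains t = false := by simpa using h
      have hm : t ∉ kv.2 := by simpa using h
      simp [hm]

lemma nodup_fold_add (vs : List String) (ord : List String) (h : ord.Nodup) :
    (vs.foldl PySem.Set.add ord).Nodup := by
  induction vs generalizing ord with
  | nil => exact h
  | cons v rest ih => exact ih _ (PySem.Set.nodup_add _ _ h)

lemma nodup_ord_fold (g : List (String × List String)) (ord : List String) (h : ord.Nodup) :
    (g.foldl (fun o kv => kv.2.foldl PySem.Set.add o) ord).Nodup := by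
  induction g generalizing ord with
  | nil => exact h
  | cons kv rest ih => exact ih _ (nodup_fold_add _ _ h)

lemma ports_agree (g : List (String × List String)) : to_dependencies_of g = to_dependencies_of_alt g := by
  unfold to_dependencies_of to_dependencies_of_alt
  dsimp only
  have hofnil : (PySem.Set.ofList [] : PySem.Set String) = [] := rfl
  rw [hofnil, foldB_outer_diag]
  have hkeys := keys_foldA g PySem.Dict.empty
  rw [PySem.Dict.keys_empty] at hkeys
  have hnodup : (g.foldl (fun deps kv => kv.2.foldl (pvAStep kv.1) deps) PySem.Dict.empty).keys.Nodup := by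
    rw [hkeys]; exact nodup_ord_fold g [] List.nodup_nil
  rw [PySem.Dict.items_eq_map_keys _ hnodup (PySem.Set.ofList []), List.map_map, hkeys]
  apply List.map_congr_left
  intro t _
  simp only [Function.comp]
  rw [getD_foldA, PySem.Dict.getD_empty]
  rfl

-- ===== VERDICT (by name: the statement is the Claim_ definition above) =====
theorem to_dependencies_of_spec : Claim_equal_to_dependencies_of := by
  intro g _
  unfold Spec_to_dependencies_of
  exact ports_agree g
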